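-- pv_equiv track=rewrite | github.com/delaykimm/time-text-alignment | utils/prompt_parser.py | flexible_subsequence_match
-- ===== SOURCE A (Python) =====
-- def flexible_subsequence_match(token_norms, phrase_words, skip_tokens={'-'}):
--     """
--     phrase_words를 token_norms 안에서 skip_tokens를 무시하면서 순차적으로 매칭.
--     성공하면 인덱스 리스트 반환.
--     """
--     L = len(token_norms)
--     M = len(phrase_words)
--     for start in range(L):
--         ti = start
--         pi = 0
--         matched = []
--         while ti < L and pi < M:
--             tok = token_norms[ti]
--             if tok in skip_tokens:
--                 ti += 1
--                 continue
--             if tok == phrase_words[pi]: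
--                 matched.append(ti)
--                 ti += 1
--                 pi += 1
--             else:
--                 break
--         if pi == M:
--             return matched
--     return []
-- ===== SOURCE B (Python) =====
-- def flexible_subsequence_match(token_norms, phrase_words, skip_tokens={'-'}):
--     # Filter skip tokens once (keeping original indices), then slide a window
--     # over the filtered sequence looking for the leftmost contiguous match.
--     kept = [(i, t) for i, t in enumerate(token_norms) if t not in skip_tokens]
--     M = len(phrase_words)
--     while len(kept) >= M:
--         if [t for _, t in kept[:M]] == phrase_words:
--             return [i for i, _ in kept[:M]]
--         kept = kept[1:]
--     return []
-- ===== Notes on version B (the rewrite author's own statement) =====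
-- stated objective: faster
-- what changed: B filters out skip tokens once (keeping original indices) and then does a single leftmost contiguous-window search over the filtered sequence, instead of A's restart-from-every-raw-position scan that re-traverses and re-skips skip tokens inside an inner while loop.
import Mathlib
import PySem

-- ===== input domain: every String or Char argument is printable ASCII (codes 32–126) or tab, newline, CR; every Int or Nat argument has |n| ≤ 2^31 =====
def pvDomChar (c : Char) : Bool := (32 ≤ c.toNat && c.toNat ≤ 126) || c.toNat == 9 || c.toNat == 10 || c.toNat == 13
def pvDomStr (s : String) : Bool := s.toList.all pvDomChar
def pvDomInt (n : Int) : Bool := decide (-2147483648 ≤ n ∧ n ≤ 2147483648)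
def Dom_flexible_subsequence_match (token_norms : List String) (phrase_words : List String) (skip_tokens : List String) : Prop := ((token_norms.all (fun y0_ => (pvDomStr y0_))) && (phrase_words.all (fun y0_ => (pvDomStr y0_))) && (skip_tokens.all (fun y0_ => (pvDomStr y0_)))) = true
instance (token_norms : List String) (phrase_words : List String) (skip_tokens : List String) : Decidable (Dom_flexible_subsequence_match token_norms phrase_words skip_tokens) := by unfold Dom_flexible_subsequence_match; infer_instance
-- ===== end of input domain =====

-- B filters skip tokens once and does a single leftmost window search on the filtered
-- sequence, replacing A's restart-from-every-raw-position scan; objective: faster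
-- (measurably so on skip-heavy inputs, where A re-skips from every start).

-- ===== PORT A =====
-- inner `while ti < L and pi < M` loop of A; state (ti, pi, matched), returns (pi, matched)
def fsmWhile (token_norms phrase_words skip_tokens : List String)
    (ti pi : Nat) (matched : List Int) : Nat × List Int :=
  if _h : ti < token_norms.length ∧ pi < phrase_words.length then
    let tok := token_norms.getD ti ""      -- token_norms[ti], in range here
    if skip_tokens.contains tok then
      fsmWhile token_norms phrase_words skip_tokens (ti + 1) pi matched
    else if tok = phrase_words.getD pi "" then  -- phrase_words[pi], in range here
      fsmWhile token_norms phrase_words skip_tokens (ti + 1) (pi + 1) (matched ++ [(ti : Int)])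
    else (pi, matched)
  else (pi, matched)
termination_by token_norms.length - ti
decreasing_by all_goals omega

-- `for start in range(L)` loop of A
def fsmOuter (token_norms phrase_words skip_tokens : List String) : List Nat → List Int
  | [] => []
  | start :: rest =>
    let r := fsmWhile token_norms phrase_words skip_tokens start 0 []
    if r.1 = phrase_words.length then r.2
    else fsmOuter token_norms phrase_words skip_tokens rest

def flexible_subsequence_match (token_norms : List String) (phrase_words : List String) (skip_tokens : List String) : List Int :=
  fsmOuter token_norms phrase_words skip_tokens (List.range token_norms.length)

-- ===== PORT B =====
-- the `while len(kept) >= M` loop of Source B; on kept = [] the window test decides [] either way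
def fsmScan (phrase_words : List String) : List (Int × String) → List Int
  | [] => []
  | p :: k =>
    if phrase_words.length ≤ (p :: k).length then
      if ((p :: k).take phrase_words.length).map Prod.snd = phrase_words then
        ((p :: k).take phrase_words.length).map Prod.fst
      else fsmScan phrase_words k
    else []

def flexible_subsequence_match_alt (token_norms : List String) (phrase_words : List String) (skip_tokens : List String) : List Int :=
  let kept := (PySem.List.enumerate token_norms 0).filter (fun p => !(skip_tokens.contains p.2))
  fsmScan phrase_words kept

-- ===== PRECONDITION & SPEC =====
def Spec_flexible_subsequence_match (token_norms : List String) (phrase_words : List String) (skip_tokens : List String) (out : List Int) : Prop := out = flexible_subsequence_match_alt token_norms phrase_words skip_tokens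
instance (token_norms : List String) (phrase_words : List String) (skip_tokens : List String) (out : List Int) : Decidable (Spec_flexible_subsequence_match token_norms phrase_words skip_tokens out) := by unfold Spec_flexible_subsequence_match; infer_instance

-- ===== CLAIM (what is proved, stated in full; the proofs are below) =====
def Claim_equal_flexible_subsequence_match : Prop := ∀ (token_norms : List String) (phrase_words : List String) (skip_tokens : List String), Dom_flexible_subsequence_match token_norms phrase_words skip_tokens → Spec_flexible_subsequence_match token_norms phrase_words skip_tokens (flexible_subsequence_match token_norms phrase_words skip_tokens)

-- ===== LEMMAS AND PROOFS =====

def keptD (tn sk : List String) (ti : Nat) : List (Int × String) :=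
  if ti < tn.length then
    (if sk.contains (tn.getD ti "") then keptD tn sk (ti + 1)
     else ((ti : Int), tn.getD ti "") :: keptD tn sk (ti + 1))
  else []
termination_by tn.length - ti
decreasing_by all_goals omega

def tryMatch : List (Int × String) → List String → Option (List Int)
  | _, [] => some []
  | [], _ :: _ => none
  | (i, t) :: k, w :: ws => if t = w then (tryMatch k ws).map (fun l => i :: l) else none

def searchK (pw : List String) : List (Int × String) → List Int
  | [] => []
  | p :: k =>
    match tryMatch (p :: k) pw with
    | some idxs => idxs
    | none => searchK pw k

lemma keptD_eq (tn sk : List String) : ∀ ti,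
    keptD tn sk ti = ((PySem.List.enumerate tn 0).drop ti).filter (fun p => !(sk.contains p.2)) := by
  intro ti
  by_cases h : ti < tn.length
  · rw [keptD]
    have hlen : ti < (PySem.List.enumerate tn 0).length := by
      rw [PySem.List.length_enumerate]; exact h
    rw [List.drop_eq_getElem_cons hlen, PySem.List.getElem_enumerate]
    rw [if_pos h, List.getD_eq_getElem tn "" h]
    have ih := keptD_eq tn sk (ti + 1)
    by_cases hs : sk.contains tn[ti]
    · rw [if_pos hs, ih, List.filter_cons, if_neg (by simpa using hs)]
    · rw [if_neg hs, ih, List.filter_cons, if_pos (by simpa using hs)]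
      simp
  · rw [keptD, if_neg h]
    rw [List.drop_eq_nil_of_le (by rw [PySem.List.length_enumerate]; omega)]
    rfl
termination_by ti => tn.length - ti
decreasing_by omega

lemma tryMatch_char : ∀ (pw : List String) (k : List (Int × String)),
    tryMatch k pw =
      if pw.length ≤ k.length ∧ (k.take pw.length).map Prod.snd = pw then
        some ((k.take pw.length).map Prod.fst)
      else none := by
  intro pw
  induction pw with
  | nil => intro k; simp [tryMatch]
  | cons w ws ih =>
    intro k
    cases k with
    | nil => simp [tryMatch]
    | cons p k' =>
      obtain ⟨i, t⟩ := p
      simp only [tryMatch, ih k', List.length_cons, List.take_succ_cons, List.map_cons,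
        Nat.add_le_add_iff_right, List.cons.injEq]
      split_ifs with h h2 h3 h3 <;> simp_all

lemma searchK_short (pw : List String) : ∀ (k : List (Int × String)),
    k.length < pw.length → searchK pw k = [] := by
  intro k
  induction k with
  | nil => intro _; rfl
  | cons p k' ih =>
    intro h
    simp only [searchK, tryMatch_char]
    rw [if_neg (fun hc => absurd hc.1 (by omega))]
    · exact ih (by simp at h ⊢; omega)
  -- placeholder

lemma fsmScan_eq_searchK (pw : List String) : ∀ (k : List (Int × String)),
    fsmScan pw k = searchK pw k := by
  intro k
  induction k with
  | nil => rfl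
  | cons p k' ih =>
    simp only [fsmScan, searchK, tryMatch_char]
    by_cases h1 : pw.length ≤ (p :: k').length
    · by_cases h2 : ((p :: k').take pw.length).map Prod.snd = pw
      · rw [if_pos h1, if_pos h2, if_pos ⟨h1, h2⟩]
      · rw [if_pos h1, if_neg h2, if_neg (fun hc => h2 hc.2), ih]
    · rw [if_neg h1, if_neg (fun hc => h1 hc.1)]
      exact (searchK_short pw k' (by simp at h1 ⊢; omega)).symm

lemma fsmWhile_spec (tn pw sk : List String) : ∀ (n ti pi : Nat) (acc : List Int),
    tn.length - ti ≤ n → pi ≤ pw.length →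
    (match tryMatch (keptD tn sk ti) (pw.drop pi) with
     | some idxs => fsmWhile tn pw sk ti pi acc = (pw.length, acc ++ idxs)
     | none => (fsmWhile tn pw sk ti pi acc).1 < pw.length) := by
  intro n
  induction n with
  | zero =>
    intro ti pi acc hn hpi
    have hti : ¬ ti < tn.length := by omega
    rw [keptD, if_neg hti]
    rw [fsmWhile, dif_neg (by tauto)]
    by_cases hM : pi = pw.length
    · subst hM
      simp [tryMatch, List.drop_length]
    · cases hd : pw.drop pi with
      | nil => exact absurd (List.drop_eq_nil_iff.1 hd) (by omega)
      | cons w ws => simp [tryMatch]; omega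
  | succ n ih =>
    intro ti pi acc hn hpi
    by_cases hti : ti < tn.length
    · by_cases hM : pi = pw.length
      · subst hM
        rw [fsmWhile, dif_neg (by omega)]
        simp [List.drop_length, tryMatch]
      · have hpiM : pi < pw.length := by omega
        have hd : pw.drop pi = pw.getD pi "" :: pw.drop (pi + 1) := by
          rw [List.getD_eq_getElem pw "" hpiM, List.drop_eq_getElem_cons hpiM]
        rw [keptD, if_pos hti]
        by_cases hs : sk.contains (tn.getD ti "")
        · have hstep : fsmWhile tn pw sk ti pi acc = fsmWhile tn pw sk (ti + 1) pi acc := by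
            rw [fsmWhile]
            simp only [dif_pos (And.intro hti hpiM), eq_true hs, if_true]
          rw [if_pos hs, hstep]
          exact ih (ti + 1) pi acc (by omega) hpi
        · have hstep : fsmWhile tn pw sk ti pi acc =
              (if tn.getD ti "" = pw.getD pi "" then
                fsmWhile tn pw sk (ti + 1) (pi + 1) (acc ++ [(ti : Int)]) else (pi, acc)) := by
            rw [fsmWhile]
            simp only [dif_pos (And.intro hti hpiM), eq_false hs, if_false]
          rw [if_neg hs, hd, hstep]
          by_cases heq : tn.getD ti "" = pw.getD pi ""
          · rw [if_pos heq]
            have := ih (ti + 1) (pi + 1) (acc ++ [(ti : Int)]) (by omega) (by omega)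
            simp only [tryMatch, heq]
            cases htm : tryMatch (keptD tn sk (ti + 1)) (pw.drop (pi + 1)) with
            | some idxs =>
              rw [htm] at this
              simp only [Option.map_some]
              rw [this]
              simp
            | none =>
              rw [htm] at this
              simpa using this
          · rw [if_neg heq]
            simp only [tryMatch, if_neg (fun hc => heq hc)]
            exact hpiM
    · rw [keptD, if_neg hti]
      rw [fsmWhile, dif_neg (by tauto)]
      by_cases hM : pi = pw.length
      · subst hM
        simp [tryMatch, List.drop_length]
      · cases hd : pw.drop pi with
        | nil => exact absurd (List.drop_eq_nil_iff.1 hd) (by omega)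
        | cons w ws => simp [tryMatch]; omega

lemma outer_eq (tn pw sk : List String) : ∀ (n ti : Nat), ti + n = tn.length →
    fsmOuter tn pw sk (List.range' ti n) = searchK pw (keptD tn sk ti) := by
  intro n
  induction n with
  | zero =>
    intro ti h
    rw [List.range'_zero, keptD, if_neg (by omega)]
    rfl
  | succ n ih =>
    intro ti h
    have hti : ti < tn.length := by omega
    rw [List.range'_succ]
    simp only [fsmOuter]
    have hspec := fsmWhile_spec tn pw sk tn.length ti 0 [] (by omega) (by omega)
    rw [List.drop_zero] at hspec
    cases htm : tryMatch (keptD tn sk ti) pw with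
    | some idxs =>
      rw [htm] at hspec
      rw [hspec]
      simp only [List.nil_append]
      simp only [if_true]

      cases hk : keptD tn sk ti with
      | nil =>
        rw [hk] at htm
        cases pw with
        | nil =>
          simp only [tryMatch, Option.some.injEq] at htm
          rw [← htm, searchK]
        | cons w ws => simp [tryMatch] at htm
      | cons p k' =>
        rw [hk] at htm
        simp [searchK, htm]
    | none =>
      rw [htm] at hspec
      rw [if_neg (by omega)]
      rw [ih (ti + 1) (by omega)]
      -- searchK (keptD ti) = searchK (keptD (ti+1)) when tryMatch fails
      by_cases hs : sk.contains (tn.getD ti "")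
      · have hkk : keptD tn sk ti = keptD tn sk (ti + 1) := by
          rw [keptD, if_pos hti, if_pos hs]
        rw [hkk]
      · have hkk : keptD tn sk ti = ((ti : Int), tn.getD ti "") :: keptD tn sk (ti + 1) := by
          rw [keptD, if_pos hti, if_neg hs]
        rw [hkk] at htm ⊢
        simp only [searchK]
        rw [htm]

-- ===== VERDICT (by name: the statement is the Claim_ definition above) =====
theorem flexible_subsequence_match_spec : Claim_equal_flexible_subsequence_match := by
  intro tn pw sk _
  unfold Spec_flexible_subsequence_match flexible_subsequence_match flexible_subsequence_match_alt
  rw [List.range_eq_range', outer_eq tn pw sk tn.length 0 (by omega), keptD_eq tn sk 0,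
      List.drop_zero, fsmScan_eq_searchK]
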